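-- pv_equiv track=rewrite | github.com/SakshamG7/E-LeetCode | Weekly/470/Q4.py | countNoZeroPairs
-- ===== SOURCE A (Python) =====
-- def countNoZeroPairs(n: int) -> int:
--     if n <= 10:
--         return n - 1
--     l = n
--     m = 10
--     while m <= n:
--         l -= n // m
--         m *= 10
--     c = 1
--     while n > 0:
--         if n % 10 != 0:
--             l -= 1
--         n //= 10
--     return l
-- ===== SOURCE B (Python) =====
-- def _digit_sum(t: int) -> int:
--     if t <= 0:
--         return 0
--     return t % 10 + _digit_sum(t // 10)
--
--
-- def _nonzero_digits(t: int) -> int: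
--     if t <= 0:
--         return 0
--     return (1 if t % 10 != 0 else 0) + _nonzero_digits(t // 10)
--
--
-- def countNoZeroPairs(n: int) -> int:
--     if n <= 10:
--         return n - 1
--     # base-10 Legendre identity: sum_{k>=1} n // 10**k == (n - digit_sum(n)) // 9
--     return n - (n - _digit_sum(n)) // 9 - _nonzero_digits(n)
-- ===== Notes on version B (the rewrite author's own statement) =====
-- stated objective: alternative
-- what changed: B drops A's loop over ascending powers of 10 that accumulates sum of n//10^k and instead computes that sum in closed form via the base-10 Legendre identity (n - digit_sum(n)) // 9, obtaining the digit sum and nonzero-digit count by structural recursion on the digits.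
import Mathlib
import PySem

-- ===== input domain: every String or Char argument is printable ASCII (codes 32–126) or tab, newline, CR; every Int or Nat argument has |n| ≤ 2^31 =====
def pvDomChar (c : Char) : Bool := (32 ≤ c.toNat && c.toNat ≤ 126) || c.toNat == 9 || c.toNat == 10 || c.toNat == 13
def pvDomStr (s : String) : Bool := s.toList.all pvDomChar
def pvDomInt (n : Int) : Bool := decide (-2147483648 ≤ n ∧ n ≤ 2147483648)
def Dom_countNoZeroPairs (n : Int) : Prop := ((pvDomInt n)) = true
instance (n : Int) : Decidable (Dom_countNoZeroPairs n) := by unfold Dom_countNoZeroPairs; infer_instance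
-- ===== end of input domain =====

-- B replaces A's iterative accumulation of Σ_{k≥1} n//10^k with the closed-form
-- base-10 Legendre identity (n - digit_sum n) // 9; objective: alternative, not faster.

-- ===== PORT A =====
-- while m <= n: l -= n // m; m *= 10   (m starts at 10 and only gets multiplied
-- by 10, so 0 < m is an invariant of the Python loop; carried as `hm` for termination)
def countNoZeroPairsLoop1 (n l m : Int) (hm : 0 < m) : Int :=
  if h : m ≤ n then
    countNoZeroPairsLoop1 n (l - PySem.Int.floordiv n m) (m * 10) (by omega)
  else l
  termination_by (n + 1 - m).toNat
  decreasing_by omega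

-- while n > 0: if n % 10 != 0: l -= 1; n //= 10
def countNoZeroPairsLoop2 (n l : Int) : Int :=
  if h : 0 < n then
    countNoZeroPairsLoop2 (PySem.Int.floordiv n 10)
      (if PySem.Int.mod n 10 ≠ 0 then l - 1 else l)
  else l
  termination_by n.toNat
  decreasing_by
    rw [PySem.Int.floordiv_eq_ediv_of_pos (by norm_num)]
    omega

def countNoZeroPairs (n : Int) : Int :=
  if n ≤ 10 then n - 1
  else
    -- (the Python variable c = 1 is never used)
    countNoZeroPairsLoop2 n (countNoZeroPairsLoop1 n n 10 (by norm_num))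

-- ===== PORT B =====
-- def _digit_sum(t): if t <= 0: return 0; return t % 10 + _digit_sum(t // 10)
def digitSumB (t : Int) : Int :=
  if h : t ≤ 0 then 0
  else PySem.Int.mod t 10 + digitSumB (PySem.Int.floordiv t 10)
  termination_by t.toNat
  decreasing_by
    rw [PySem.Int.floordiv_eq_ediv_of_pos (by norm_num)]
    omega

-- def _nonzero_digits(t): if t <= 0: return 0; return (1 if t % 10 != 0 else 0) + _nonzero_digits(t // 10)
def nonzeroDigitsB (t : Int) : Int :=
  if h : t ≤ 0 then 0
  else (if PySem.Int.mod t 10 ≠ 0 then 1 else 0) + nonzeroDigitsB (PySem.Int.floordiv t 10)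
  termination_by t.toNat
  decreasing_by
    rw [PySem.Int.floordiv_eq_ediv_of_pos (by norm_num)]
    omega

def countNoZeroPairs_alt (n : Int) : Int :=
  if n ≤ 10 then n - 1
  else n - PySem.Int.floordiv (n - digitSumB n) 9 - nonzeroDigitsB n

-- ===== PRECONDITION & SPEC =====
def Spec_countNoZeroPairs (n : Int) (out : Int) : Prop := out = countNoZeroPairs_alt n
instance (n : Int) (out : Int) : Decidable (Spec_countNoZeroPairs n out) := by unfold Spec_countNoZeroPairs; infer_instance

-- ===== CLAIM (what is proved, stated in full; the proofs are below) =====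
def Claim_equal_countNoZeroPairs : Prop := ∀ (n : Int), Dom_countNoZeroPairs n → Spec_countNoZeroPairs n (countNoZeroPairs n)

-- ===== LEMMAS AND PROOFS =====

theorem pv_fd10 (x : Int) : PySem.Int.floordiv x 10 = x / 10 :=
  PySem.Int.floordiv_eq_ediv_of_pos (by norm_num)

theorem pv_md10 (x : Int) : PySem.Int.mod x 10 = x % 10 :=
  PySem.Int.mod_eq_emod_of_pos (by norm_num)

-- 9 divides n - digit_sum(n) for n ≥ 0
theorem nine_dvd : ∀ (k : Nat) (n : Int), n.toNat ≤ k → 0 ≤ n →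
    (9 : Int) ∣ (n - digitSumB n) := by
  intro k
  induction k with
  | zero =>
    intro n hk hn
    have h0 : n = 0 := by omega
    rw [digitSumB, dif_pos (by omega)]
    simp [h0]
  | succ k ih =>
    intro n hk hn
    by_cases h : n ≤ 0
    · rw [digitSumB, dif_pos h]
      have : n = 0 := by omega
      simp [this]
    · rw [digitSumB, dif_neg h, pv_fd10, pv_md10]
      have hq : 0 ≤ n / 10 := by positivity
      have hd := ih (n / 10) (by omega) hq
      have hnm : n = 10 * (n / 10) + n % 10 := (Int.ediv_add_emod' n 10).symm ▸ by omega
      obtain ⟨c, hc⟩ := hd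
      exact ⟨n / 10 + c, by omega⟩

-- Loop 1 of A computes l - (n - digit_sum n)/9 when started at m = 10
theorem loop1_eq : ∀ (k : Nat) (n : Int), n.toNat ≤ k → 0 ≤ n → ∀ (l : Int),
    countNoZeroPairsLoop1 n l 10 (by norm_num) = l - (n - digitSumB n) / 9 := by
  intro k
  induction k with
  | zero =>
    intro n hk hn l
    have h0 : n = 0 := by omega
    subst h0
    rw [countNoZeroPairsLoop1, dif_neg (by norm_num), digitSumB, dif_pos (by norm_num)]
    norm_num
  | succ k ih =>
    intro n hk hn l
    by_cases h10 : (10 : Int) ≤ n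
    · -- one step of the loop, then shift the power cursor down one decimal place
      have hq : 0 ≤ n / 10 := by positivity
      have hqk : (n / 10).toNat ≤ k := by omega
      conv_lhs => rw [countNoZeroPairsLoop1]
      rw [dif_pos h10]
      have hshift : ∀ (l' : Int) (k' : Nat) (m : Int) (hm : 0 < m),
          (n + 1 - m * 10).toNat ≤ k' →
          countNoZeroPairsLoop1 n l' (m * 10) (by omega) =
            countNoZeroPairsLoop1 (n / 10) l' m hm := by
        intro l' k'
        induction k' generalizing l' with
        | zero =>
          intro m hm hk'
          have hc : ¬ m * 10 ≤ n := by omega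
          have hc' : ¬ m ≤ n / 10 := by
            rw [Int.le_ediv_iff_mul_le (by norm_num)]; omega
          rw [countNoZeroPairsLoop1, dif_neg hc, countNoZeroPairsLoop1, dif_neg hc']
        | succ k' ihs =>
          intro m hm hk'
          have hc : m * 10 ≤ n ↔ m ≤ n / 10 := by
            rw [Int.le_ediv_iff_mul_le (by norm_num)]
          conv_lhs => rw [countNoZeroPairsLoop1]
          conv_rhs => rw [countNoZeroPairsLoop1]
          by_cases h : m * 10 ≤ n
          · rw [dif_pos h, dif_pos (hc.mp h)]
            have hb : PySem.Int.floordiv n (m * 10)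
                = PySem.Int.floordiv (n / 10) m := by
              rw [PySem.Int.floordiv_eq_ediv_of_pos (by omega),
                  PySem.Int.floordiv_eq_ediv_of_pos hm,
                  Int.ediv_ediv_of_nonneg (by norm_num), mul_comm]
            rw [hb]
            exact ihs _ (m * 10) (by omega) (by omega)
          · rw [dif_neg h, dif_neg (fun hx => h (hc.mpr hx))]
      rw [hshift _ (n + 1 - 100).toNat 10 (by norm_num) le_rfl,
          ih (n / 10) hqk hq, pv_fd10]
      -- arithmetic: (n - ds n)/9 = n/10 + (n/10 - ds (n/10))/9
      have hds : digitSumB n = PySem.Int.mod n 10 + digitSumB (PySem.Int.floordiv n 10) := by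
        rw [digitSumB, dif_neg (by omega)]
      obtain ⟨c, hc⟩ := nine_dvd (n / 10).toNat (n / 10) le_rfl hq
      have hsplit : n - digitSumB n = 9 * (n / 10 + c) := by
        rw [hds, pv_fd10, pv_md10]
        have hnm : n = 10 * (n / 10) + n % 10 := (Int.ediv_add_emod' n 10).symm ▸ by omega
        omega
      rw [hsplit, hc, Int.mul_ediv_cancel_left _ (by norm_num),
          Int.mul_ediv_cancel_left _ (by norm_num)]
      ring
    · -- n < 10: loop exits at once; digitSumB n = n
      rw [countNoZeroPairsLoop1, dif_neg h10]
      have hds : digitSumB n = n := by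
        by_cases h0 : n ≤ 0
        · rw [digitSumB, dif_pos h0]; omega
        · rw [digitSumB, dif_neg h0, pv_fd10, pv_md10,
              digitSumB, dif_pos (by omega : n / 10 ≤ 0)]
          omega
      rw [hds]
      norm_num

-- Loop 2 of A subtracts the number of nonzero digits
theorem loop2_eq : ∀ (k : Nat) (n : Int), n.toNat ≤ k → ∀ (l : Int),
    countNoZeroPairsLoop2 n l = l - nonzeroDigitsB n := by
  intro k
  induction k with
  | zero =>
    intro n hk l
    rw [countNoZeroPairsLoop2, dif_neg (by omega : ¬ 0 < n),
        nonzeroDigitsB, dif_pos (by omega : n ≤ 0)]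
    ring
  | succ k ih =>
    intro n hk l
    by_cases h : 0 < n
    · rw [countNoZeroPairsLoop2, dif_pos h, nonzeroDigitsB, dif_neg (by omega)]
      rw [ih (PySem.Int.floordiv n 10) (by rw [pv_fd10]; omega)]
      by_cases hd : PySem.Int.mod n 10 ≠ 0
      · rw [if_pos hd, if_pos hd]; ring
      · rw [if_neg hd, if_neg hd]; ring
    · rw [countNoZeroPairsLoop2, dif_neg h,
          nonzeroDigitsB, dif_pos (by omega : n ≤ 0)]
      ring

-- ===== VERDICT (by name: the statement is the Claim_ definition above) =====
theorem countNoZeroPairs_spec : Claim_equal_countNoZeroPairs := by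
  intro n _
  unfold Spec_countNoZeroPairs countNoZeroPairs countNoZeroPairs_alt
  by_cases h : n ≤ 10
  · simp [h]
  · simp only [h, if_false]
    rw [loop1_eq n.toNat n le_rfl (by omega),
        loop2_eq n.toNat n le_rfl,
        PySem.Int.floordiv_eq_ediv_of_pos (by norm_num : (0:Int) < 9)]
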